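-- pv_equiv track=rewrite | github.com/LRXA2/Reminder-Agent-Public | src/app/handlers/services/calendar_sync_handler.py | clean_calendar_import_notes
-- ===== SOURCE A (Python) =====
-- def clean_calendar_import_notes(notes: str) -> str:
--     lines = [line.rstrip() for line in (notes or "").splitlines()]
--     cleaned: list[str] = []
--     for line in lines:
--         stripped = line.strip()
--         lowered = stripped.lower()
--         if not stripped:
--             if cleaned and cleaned[-1] != "":
--                 cleaned.append("")
--             continue
--         if lowered.startswith("reminder id:"):
--             continue
--         if lowered.startswith("priority:"):
--             continue
--         if lowered.startswith("link:"):
--             continue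
--         if lowered.startswith("topic:"):
--             continue
--         cleaned.append(stripped)
--
--     while cleaned and cleaned[-1] == "":
--         cleaned.pop()
--     return "\n".join(cleaned).strip()
-- ===== SOURCE B (Python) =====
-- _META = ("reminder id:", "priority:", "link:", "topic:")
--
--
-- def clean_calendar_import_notes(notes: str) -> str:
--     # Filter pass: strip every line, drop metadata lines (blank lines survive as "").
--     kept = [s for s in (line.strip() for line in (notes or "").splitlines())
--             if not s.lower().startswith(_META)]
--     # Paragraph pass: maximal runs of non-blank lines become paragraphs.
--     paragraphs = []
--     cur = []
--     for s in kept: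
--         if s:
--             cur.append(s)
--         elif cur:
--             paragraphs.append(cur)
--             cur = []
--     if cur:
--         paragraphs.append(cur)
--     return "\n\n".join("\n".join(p) for p in paragraphs).strip()
-- ===== Notes on version B (the rewrite author's own statement) =====
-- stated objective: simpler
-- what changed: A's single stateful pass (inspecting cleaned[-1] to insert separator blanks, then a while-loop popping trailing blanks) is replaced by a filter comprehension that drops metadata lines followed by grouping the kept lines into paragraphs joined by blank-line separators, which makes the blank-line normalization implicit in the join.
import Mathlib
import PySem

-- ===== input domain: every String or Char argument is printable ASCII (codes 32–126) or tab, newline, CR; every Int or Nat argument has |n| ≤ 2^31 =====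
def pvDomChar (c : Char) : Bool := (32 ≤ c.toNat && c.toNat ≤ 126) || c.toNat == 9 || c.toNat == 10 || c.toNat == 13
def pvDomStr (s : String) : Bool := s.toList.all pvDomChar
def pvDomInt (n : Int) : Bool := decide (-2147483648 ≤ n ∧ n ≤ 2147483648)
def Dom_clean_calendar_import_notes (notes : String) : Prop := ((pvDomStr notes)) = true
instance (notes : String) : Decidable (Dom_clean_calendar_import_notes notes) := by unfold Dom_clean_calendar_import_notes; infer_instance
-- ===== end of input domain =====

-- B replaces A's single stateful pass (last-element inspection, trailing pop loop) by a
-- filter pass followed by grouping the kept lines into blank-separated paragraphs (simpler).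

-- ===== PORT A =====
-- the body of A's for-loop, one line at a time
def pvStepA (cleaned : List String) (line : String) : List String :=
  let stripped := PySem.Str.strip line
  let lowered := PySem.Str.lower stripped
  if stripped = "" then
    if cleaned ≠ [] ∧ cleaned.getLast? ≠ some "" then cleaned ++ [""] else cleaned
  else if PySem.Str.startswith lowered "reminder id:" then cleaned
  else if PySem.Str.startswith lowered "priority:" then cleaned
  else if PySem.Str.startswith lowered "link:" then cleaned
  else if PySem.Str.startswith lowered "topic:" then cleaned
  else cleaned ++ [stripped]

-- A's "while cleaned and cleaned[-1] == '': cleaned.pop()" (drop the trailing run of "")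
def pvPopTrailing (xs : List String) : List String :=
  ((xs.reverse).dropWhile (fun s => s == "")).reverse

def clean_calendar_import_notes (notes : String) : String :=
  let base := if notes = "" then "" else notes
  let lines := (PySem.Str.splitlines base).map PySem.Str.rstrip
  let cleaned := lines.foldl pvStepA []
  PySem.Str.strip (PySem.Str.join "\n" (pvPopTrailing cleaned))

-- ===== PORT B =====
def pvMeta : List String := ["reminder id:", "priority:", "link:", "topic:"]

def pvIsMeta (s : String) : Bool :=
  pvMeta.any (fun p => PySem.Str.startswith (PySem.Str.lower s) p)

-- B's paragraph loop: cur collects the current run of non-blank lines, paras the finished runs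
def pvParasLoop : List String → List String → List (List String) → List (List String)
  | [], cur, paras => if cur ≠ [] then paras ++ [cur] else paras
  | s :: rest, cur, paras =>
    if s ≠ "" then pvParasLoop rest (cur ++ [s]) paras
    else if cur ≠ [] then pvParasLoop rest [] (paras ++ [cur])
    else pvParasLoop rest cur paras

def clean_calendar_import_notes_alt (notes : String) : String :=
  let base := if notes = "" then "" else notes
  let kept := ((PySem.Str.splitlines base).map PySem.Str.strip).filter (fun s => !pvIsMeta s)
  let paras := pvParasLoop kept [] []
  PySem.Str.strip (PySem.Str.join "\n\n" (paras.map (fun p => PySem.Str.join "\n" p)))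

-- ===== PRECONDITION & SPEC =====
def Spec_clean_calendar_import_notes (notes : String) (out : String) : Prop := out = clean_calendar_import_notes_alt notes
instance (notes : String) (out : String) : Decidable (Spec_clean_calendar_import_notes notes out) := by unfold Spec_clean_calendar_import_notes; infer_instance

-- ===== CLAIM (what is proved, stated in full; the proofs are below) =====
def Claim_equal_clean_calendar_import_notes : Prop := ∀ (notes : String), Dom_clean_calendar_import_notes notes → Spec_clean_calendar_import_notes notes (clean_calendar_import_notes notes)

-- ===== LEMMAS AND PROOFS =====

theorem pv_str_ext (a b : String) (h : a.toList = b.toList) : a = b := by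
  have h1 := congrArg String.ofList h
  have r : ∀ s : String, String.ofList s.toList = s := by intro s; simp [String.ofList]
  rwa [r, r] at h1

-- blocks of kept lines, flattened with "" separators (the shape of A's `cleaned` list)
def pvFlat : List (List String) → List String
  | [] => []
  | [b] => b
  | b :: bs => b ++ "" :: pvFlat bs

def pvPre (p : List (List String)) : List String := if p = [] then [] else [""]

theorem pvFlat_cons (b : List String) (bs : List (List String)) (h : bs ≠ []) :
    pvFlat (b :: bs) = b ++ "" :: pvFlat bs := by
  cases bs with
  | nil => exact absurd rfl h
  | cons x xs => rfl

theorem pvFlat_ne (p : List (List String)) (hp : ∀ b ∈ p, b ≠ []) (h : p ≠ []) :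
    pvFlat p ≠ [] := by
  cases p with
  | nil => exact absurd rfl h
  | cons b bs =>
    cases bs with
    | nil => exact hp b (by simp)
    | cons x xs => simp [pvFlat]

theorem pvFlat_append (p : List (List String)) (c : List String) :
    pvFlat (p ++ [c]) = pvFlat p ++ pvPre p ++ c := by
  induction p with
  | nil => simp [pvFlat, pvPre]
  | cons b bs ih =>
    rw [List.cons_append, pvFlat_cons b (bs ++ [c]) (by simp)]
    cases bs with
    | nil => simp [pvFlat, pvPre]
    | cons x xs =>
      rw [ih, pvFlat_cons b (x :: xs) (by simp)]
      simp [pvPre]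

theorem pvFlat_getLast (p : List (List String)) (hp : ∀ b ∈ p, b ≠ [] ∧ "" ∉ b) :
    ∀ v, (pvFlat p).getLast? = some v → v ≠ "" := by
  induction p with
  | nil => intro v hv; simp [pvFlat] at hv
  | cons b bs ih =>
    intro v hv
    cases bs with
    | nil =>
      have hb := hp b (by simp)
      have : v ∈ b := List.mem_of_getLast? hv
      intro h; exact hb.2 (h ▸ this)
    | cons x xs =>
      rw [pvFlat_cons b (x :: xs) (by simp)] at hv
      have hne : pvFlat (x :: xs) ≠ [] :=
        pvFlat_ne _ (fun b hb => (hp b (by simp [hb])).1) (by simp)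
      rw [show ("" :: pvFlat (x :: xs)) = [""] ++ pvFlat (x :: xs) from rfl,
          List.getLast?_append_of_ne_nil _ (by simp),
          List.getLast?_append_of_ne_nil _ hne] at hv
      exact ih (fun b hb => hp b (by simp [hb])) v hv

theorem pvPopTrailing_blank (xs : List String) :
    pvPopTrailing (xs ++ [""]) = pvPopTrailing xs := by
  simp [pvPopTrailing]

theorem pvPopTrailing_eq_self (xs : List String)
    (h : ∀ v, xs.getLast? = some v → v ≠ "") : pvPopTrailing xs = xs := by
  unfold pvPopTrailing
  cases hr : xs.reverse with
  | nil => simp [List.reverse_eq_nil_iff.mp hr]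
  | cons a t =>
    have ha : xs.getLast? = some a := by
      rw [List.getLast?_eq_head?_reverse, hr]; rfl
    have : (a == "") = false := by
      simp only [beq_eq_false_iff_ne]; exact h a ha
    rw [List.dropWhile_cons, this]
    simp [← hr]

-- ---- join lemmas (char level) ----

theorem pv_cjoin_cons (sep : List Char) (x : List Char) (ys : List (List Char)) (h : ys ≠ []) :
    PySem.Chars.join sep (x :: ys) = x ++ sep ++ PySem.Chars.join sep ys := by
  cases ys with
  | nil => exact absurd rfl h
  | cons y t => simp [PySem.Chars.join, List.intercalate, List.intersperse]

theorem pv_cjoin_append (sep : List Char) (xs ys : List (List Char)) (hx : xs ≠ []) (hy : ys ≠ []) :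
    PySem.Chars.join sep (xs ++ ys)
      = PySem.Chars.join sep xs ++ sep ++ PySem.Chars.join sep ys := by
  induction xs with
  | nil => exact absurd rfl hx
  | cons x t ih =>
    cases t with
    | nil =>
      simp only [List.singleton_append]
      rw [pv_cjoin_cons sep x ys hy]
      simp [PySem.Chars.join, List.intercalate]
    | cons x' t' =>
      rw [List.cons_append, pv_cjoin_cons sep x (x' :: t' ++ ys) (by simp),
          pv_cjoin_cons sep x (x' :: t') (by simp), ih (by simp) ]
      simp [List.append_assoc]

theorem pv_cjoin_flat (p : List (List String)) (hp : ∀ b ∈ p, b ≠ []) :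
    PySem.Chars.join ['\n'] ((pvFlat p).map String.toList)
      = PySem.Chars.join ['\n', '\n'] (p.map (fun b => PySem.Chars.join ['\n'] (b.map String.toList))) := by
  induction p with
  | nil => simp [pvFlat, PySem.Chars.join, List.intercalate]
  | cons b bs ih =>
    cases bs with
    | nil => simp [pvFlat, PySem.Chars.join, List.intercalate]
    | cons x xs =>
      rw [pvFlat_cons b (x :: xs) (by simp)]
      have hb : b ≠ [] := hp b (by simp)
      have hfne : pvFlat (x :: xs) ≠ [] :=
        pvFlat_ne _ (fun b' hb' => hp b' (by simp [hb'])) (by simp)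
      rw [List.map_append, List.map_cons,
          pv_cjoin_append ['\n'] (b.map String.toList) (("" : String).toList :: (pvFlat (x :: xs)).map String.toList)
            (by simpa using hb) (by simp),
          pv_cjoin_cons ['\n'] _ _ (by simpa using hfne),
          List.map_cons,
          pv_cjoin_cons ['\n', '\n']
            (PySem.Chars.join ['\n'] (List.map String.toList b))
            (List.map (fun b => PySem.Chars.join ['\n'] (List.map String.toList b)) (x :: xs))
            (by simp),
          ih (fun b' hb' => hp b' (by simp [hb']))]
      simp [List.append_assoc]

theorem pv_join_flat (p : List (List String)) (hp : ∀ b ∈ p, b ≠ []) :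
    PySem.Str.join "\n" (pvFlat p)
      = PySem.Str.join "\n\n" (p.map (fun b => PySem.Str.join "\n" b)) := by
  apply pv_str_ext
  rw [PySem.Str.toList_join, PySem.Str.toList_join]
  have h1 : ("\n" : String).toList = ['\n'] := by decide
  have h2 : ("\n\n" : String).toList = ['\n', '\n'] := by decide
  rw [h1, h2, List.map_map]
  have : (String.toList ∘ fun b => PySem.Str.join "\n" b)
      = fun b => PySem.Chars.join ['\n'] (b.map String.toList) := by
    funext b; simp [PySem.Str.toList_join, h1]
  rw [this]
  exact pv_cjoin_flat p hp

-- ---- strip ∘ rstrip = strip ----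

theorem pv_dropWhile_idem {α : Type} (p : α → Bool) (l : List α) :
    List.dropWhile p (List.dropWhile p l) = List.dropWhile p l := by
  induction l with
  | nil => simp
  | cons a t ih =>
    by_cases h : p a = true
    · simp [h, ih]
    · simp [h]

theorem pv_rstrip_idem (l : List Char) :
    PySem.Chars.rstrip (PySem.Chars.rstrip l) = PySem.Chars.rstrip l := by
  simp [PySem.Chars.rstrip, pv_dropWhile_idem]

theorem pv_lstrip_rstrip_head (x : Char) (xs : List Char) (hx : PySem.Chars.isspace x = false) :
    PySem.Chars.lstrip (PySem.Chars.rstrip (x :: xs)) = PySem.Chars.rstrip (x :: xs) := by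
  unfold PySem.Chars.rstrip PySem.Chars.lstrip
  rw [List.reverse_cons, List.dropWhile_append]
  by_cases h : (List.dropWhile PySem.Chars.isspace xs.reverse).isEmpty = true
  · rw [if_pos h]
    simp [List.dropWhile, hx]
  · rw [if_neg h, List.reverse_append]
    simp [hx]

theorem pv_lstrip_rstrip_comm (l : List Char) :
    PySem.Chars.lstrip (PySem.Chars.rstrip l) = PySem.Chars.rstrip (PySem.Chars.lstrip l) := by
  by_cases hd : List.dropWhile PySem.Chars.isspace l = []
  · have hall : ∀ x ∈ l, PySem.Chars.isspace x = true := List.dropWhile_eq_nil_iff.mp hd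
    have h1 : List.dropWhile PySem.Chars.isspace l.reverse = [] := by
      rw [List.dropWhile_eq_nil_iff]
      intro x hx; exact hall x (List.mem_reverse.mp hx)
    simp [PySem.Chars.lstrip, PySem.Chars.rstrip, hd, h1]
  · obtain ⟨x, xs, hxx⟩ : ∃ x xs, List.dropWhile PySem.Chars.isspace l = x :: xs := by
      cases h : List.dropWhile PySem.Chars.isspace l with
      | nil => exact absurd h hd
      | cons a t => exact ⟨a, t, rfl⟩
    have hx : PySem.Chars.isspace x = false := by
      have := List.head_dropWhile_not PySem.Chars.isspace (l := l) (by rw [hxx]; simp)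
      simpa [hxx] using this
    have hsplit : List.takeWhile PySem.Chars.isspace l ++ (x :: xs) = l := by
      rw [← hxx]; exact List.takeWhile_append_dropWhile
    have htw : List.dropWhile PySem.Chars.isspace (List.takeWhile PySem.Chars.isspace l) = [] := by
      rw [List.dropWhile_eq_nil_iff]
      intro y hy; exact List.mem_takeWhile_imp hy
    have hne : (List.dropWhile PySem.Chars.isspace (x :: xs).reverse).isEmpty = false := by
      rw [List.isEmpty_eq_false_iff, Ne, List.dropWhile_eq_nil_iff]
      intro hall
      have := hall x (by simp)
      rw [hx] at this
      exact Bool.false_ne_true this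
    have hrl : PySem.Chars.rstrip l
        = List.takeWhile PySem.Chars.isspace l ++ PySem.Chars.rstrip (x :: xs) := by
      unfold PySem.Chars.rstrip
      conv_lhs => rw [← hsplit]
      rw [List.reverse_append, List.dropWhile_append, if_neg (by rw [Bool.not_eq_true]; exact hne),
          List.reverse_append, List.reverse_reverse]
    rw [hrl]
    unfold PySem.Chars.lstrip
    rw [List.dropWhile_append, if_pos (by simp [htw]), hxx]
    exact pv_lstrip_rstrip_head x xs hx

theorem pv_strip_rstrip (l : List Char) :
    PySem.Chars.strip (PySem.Chars.rstrip l) = PySem.Chars.strip l := by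
  unfold PySem.Chars.strip
  rw [pv_lstrip_rstrip_comm, pv_rstrip_idem]

theorem pv_str_strip_rstrip (s : String) :
    PySem.Str.strip (PySem.Str.rstrip s) = PySem.Str.strip s := by
  apply pv_str_ext
  rw [PySem.Str.toList_strip, PySem.Str.toList_strip, PySem.Str.toList_rstrip]
  exact pv_strip_rstrip s.toList

theorem pvStepA_rstrip (acc : List String) (l : String) :
    pvStepA acc (PySem.Str.rstrip l) = pvStepA acc l := by
  unfold pvStepA
  rw [pv_str_strip_rstrip]

theorem pvIsMeta_empty : pvIsMeta "" = false := by decide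

theorem pv_stepA_meta (acc : List String) (l : String)
    (hm : pvIsMeta (PySem.Str.strip l) = true) : pvStepA acc l = acc := by
  have hs : ¬ PySem.Str.strip l = "" := by
    intro h; rw [h, pvIsMeta_empty] at hm; exact Bool.false_ne_true hm
  simp only [pvIsMeta, pvMeta, List.any_cons, List.any_nil, Bool.or_eq_true,
    Bool.or_false] at hm
  unfold pvStepA
  rw [if_neg hs]
  split_ifs with h1 h2 h3 h4
  · rfl
  · rfl
  · rfl
  · rfl
  · rcases hm with h | h | h | h
    · exact absurd h h1
    · exact absurd h h2
    · exact absurd h h3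
    · exact absurd h h4

theorem pv_stepA_content (acc : List String) (l : String)
    (hm : pvIsMeta (PySem.Str.strip l) = false) (hs : PySem.Str.strip l ≠ "") :
    pvStepA acc l = acc ++ [PySem.Str.strip l] := by
  simp only [pvIsMeta, pvMeta, List.any_cons, List.any_nil, Bool.or_eq_false_iff,
    Bool.or_false] at hm
  obtain ⟨h1, h2, h3, h4⟩ := hm
  unfold pvStepA
  rw [if_neg hs, if_neg (by rw [Bool.not_eq_true]; exact h1),
      if_neg (by rw [Bool.not_eq_true]; exact h2),
      if_neg (by rw [Bool.not_eq_true]; exact h3),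
      if_neg (by rw [Bool.not_eq_true]; exact h4)]

theorem pv_stepA_blank (acc : List String) (l : String) (hs : PySem.Str.strip l = "") :
    pvStepA acc l = if acc ≠ [] ∧ acc.getLast? ≠ some "" then acc ++ [""] else acc := by
  unfold pvStepA
  rw [if_pos hs]

-- the main loop invariant
theorem pv_loop_eq (lines : List String) (p : List (List String)) (c : List String)
    (hc : "" ∉ c) (hp : ∀ b ∈ p, b ≠ [] ∧ "" ∉ b) :
    PySem.Str.join "\n" (pvPopTrailing (lines.foldl pvStepA (pvFlat p ++ pvPre p ++ c)))
      = PySem.Str.join "\n\n"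
          ((pvParasLoop ((lines.map PySem.Str.strip).filter (fun s => !pvIsMeta s)) c p).map
            (fun b => PySem.Str.join "\n" b)) := by
  induction lines generalizing p c with
  | nil =>
    simp only [List.foldl_nil, List.map_nil, List.filter_nil]
    by_cases hc0 : c = []
    · subst hc0
      rw [show pvParasLoop [] [] p = p from by simp [pvParasLoop]]
      by_cases hp0 : p = []
      · subst hp0
        rfl
      · rw [show pvFlat p ++ pvPre p ++ ([] : List String) = pvFlat p ++ [""] by
          simp [pvPre, hp0]]
        rw [pvPopTrailing_blank, pvPopTrailing_eq_self _ (pvFlat_getLast p hp)]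
        exact pv_join_flat p (fun b hb => (hp b hb).1)
    · rw [show pvParasLoop [] c p = p ++ [c] from by simp [pvParasLoop, hc0]]
      rw [show pvFlat p ++ pvPre p ++ c = pvFlat (p ++ [c]) from (pvFlat_append p c).symm]
      rw [pvPopTrailing_eq_self _ (pvFlat_getLast (p ++ [c]) (by
        intro b hb
        rcases List.mem_append.mp hb with h | h
        · exact hp b h
        · simp only [List.mem_singleton] at h
          exact h ▸ ⟨hc0, hc⟩))]
      exact pv_join_flat (p ++ [c]) (by
        intro b hb
        rcases List.mem_append.mp hb with h | h
        · exact (hp b h).1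
        · simp only [List.mem_singleton] at h
          exact h ▸ hc0)
  | cons l rest ih =>
    simp only [List.foldl_cons, List.map_cons, List.filter_cons]
    by_cases hm : pvIsMeta (PySem.Str.strip l) = true
    · rw [pv_stepA_meta _ l hm, show (!pvIsMeta (PySem.Str.strip l)) = false by simp [hm],
        if_neg (by simp)]
      exact ih p c hc hp
    · have hm' : pvIsMeta (PySem.Str.strip l) = false := by
        simpa using hm
      rw [show (!pvIsMeta (PySem.Str.strip l)) = true by simp [hm'], if_pos rfl]
      by_cases hs : PySem.Str.strip l = ""
      · rw [hs]
        rw [show pvParasLoop ("" :: (rest.map PySem.Str.strip).filter (fun s => !pvIsMeta s)) c p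
            = if c ≠ [] then
                pvParasLoop ((rest.map PySem.Str.strip).filter (fun s => !pvIsMeta s)) [] (p ++ [c])
              else pvParasLoop ((rest.map PySem.Str.strip).filter (fun s => !pvIsMeta s)) c p from by
          simp [pvParasLoop]]
        by_cases hc0 : c = []
        · subst hc0
          rw [if_neg (by simp)]
          rw [pv_stepA_blank _ l hs]
          by_cases hp0 : p = []
          · rw [if_neg (by simp [hp0, pvFlat, pvPre])]
            exact ih p [] hc hp
          · rw [if_neg (by
              rw [show pvFlat p ++ pvPre p ++ ([] : List String) = pvFlat p ++ [""] by
                simp [pvPre, hp0]]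
              simp)]
            exact ih p [] hc hp
        · rw [if_pos hc0]
          rw [pv_stepA_blank _ l hs]
          have hlast : (pvFlat p ++ pvPre p ++ c).getLast? ≠ some "" := by
            rw [List.getLast?_append_of_ne_nil _ hc0]
            intro h
            exact hc (List.mem_of_getLast? h)
          rw [if_pos ⟨by simp [hc0], hlast⟩]
          have hstate : pvFlat p ++ pvPre p ++ c ++ [""]
              = pvFlat (p ++ [c]) ++ pvPre (p ++ [c]) ++ ([] : List String) := by
            rw [pvFlat_append]
            simp [pvPre]
          rw [hstate]
          exact ih (p ++ [c]) [] (by simp) (by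
            intro b hb
            rcases List.mem_append.mp hb with h | h
            · exact hp b h
            · simp only [List.mem_singleton] at h
              exact h ▸ ⟨hc0, hc⟩)
      · rw [pv_stepA_content _ l hm' hs]
        rw [show pvParasLoop (PySem.Str.strip l :: (rest.map PySem.Str.strip).filter (fun s => !pvIsMeta s)) c p
            = pvParasLoop ((rest.map PySem.Str.strip).filter (fun s => !pvIsMeta s))
                (c ++ [PySem.Str.strip l]) p from by
          simp [pvParasLoop, hs]]
        rw [show pvFlat p ++ pvPre p ++ c ++ [PySem.Str.strip l]
            = pvFlat p ++ pvPre p ++ (c ++ [PySem.Str.strip l]) by simp]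
        exact ih p (c ++ [PySem.Str.strip l]) (by
          intro h
          rcases List.mem_append.mp h with h' | h'
          · exact hc h'
          · simp only [List.mem_singleton] at h'
            exact hs h'.symm) hp

-- ===== VERDICT (by name: the statement is the Claim_ definition above) =====
theorem clean_calendar_import_notes_spec : Claim_equal_clean_calendar_import_notes := by
  intro notes _
  have hfold : ∀ (L : List String) (acc : List String),
      L.foldl (fun a l => pvStepA a (PySem.Str.rstrip l)) acc = L.foldl pvStepA acc := by
    intro L acc
    simp only [pvStepA_rstrip]
  have hmain := pv_loop_eq (PySem.Str.splitlines (if notes = "" then "" else notes)) [] []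
    (by simp) (by simp)
  have h0 : pvFlat [] ++ pvPre [] ++ ([] : List String) = [] := by simp [pvFlat, pvPre]
  rw [h0] at hmain
  unfold Spec_clean_calendar_import_notes clean_calendar_import_notes clean_calendar_import_notes_alt
  show PySem.Str.strip (PySem.Str.join "\n" (pvPopTrailing (List.foldl pvStepA []
      (List.map PySem.Str.rstrip (PySem.Str.splitlines (if notes = "" then "" else notes)))))) = _
  rw [List.foldl_map, hfold, hmain]
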